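-- pv_equiv track=rewrite | github.com/mohramebrahem-prog/mohram-iiii | utils.py | ghost_numbers
-- ===== SOURCE A (Python) =====
-- _BOLD_DIGITS = {
--     '0': '𝟎', '1': '𝟏', '2': '𝟐', '3': '𝟑', '4': '𝟒',
--     '5': '𝟓', '6': '𝟔', '7': '𝟕', '8': '𝟖', '9': '𝟗',
-- }
--
-- def ghost_numbers(text: str) -> str:
--     result = []; i = 0
--     while i < len(text):
--         c = text[i]
--         if c.isdigit():
--             j = i
--             while j < len(text) and text[j].isdigit(): j += 1
--             num_str = text[i:j]
--             if len(num_str) >= 3: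
--                 result.append(''.join(_BOLD_DIGITS.get(d, d) for d in num_str))
--             else: result.append(num_str)
--             i = j
--         else: result.append(c); i += 1
--     return ''.join(result)
-- ===== SOURCE B (Python) =====
-- _BOLD_DIGITS = {
--     '0': '𝟎', '1': '𝟏', '2': '𝟐', '3': '𝟑', '4': '𝟒',
--     '5': '𝟓', '6': '𝟔', '7': '𝟕', '8': '𝟖', '9': '𝟗',
-- }
--
-- def ghost_numbers(text: str) -> str:
--     # Pass 1: fwd[i] = length of the digit run ending at i (0 for non-digits).
--     fwd = []
--     r = 0
--     for c in text:
--         r = r + 1 if c.isdigit() else 0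
--         fwd.append(r)
--     # Pass 2: bwd[i] = length of the digit run starting at i (0 for non-digits).
--     bwd = []
--     r = 0
--     for c in reversed(text):
--         r = r + 1 if c.isdigit() else 0
--         bwd.append(r)
--     bwd.reverse()
--     # fwd[i] + bwd[i] = (run length) + 1 for a digit at i, so >= 4 means run >= 3.
--     return ''.join(_BOLD_DIGITS.get(c, c) if f + b >= 4 else c
--                    for c, f, b in zip(text, fwd, bwd))
-- ===== Notes on version B (the rewrite author's own statement) =====
-- stated objective: alternative
-- what changed: Replaces A's lookahead two-pointer run extraction with two run-length counter passes (forward and backward over the string) followed by a pointwise zip translation that bolds a digit exactly when its forward+backward run counts sum to at least 4.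
import Mathlib
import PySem

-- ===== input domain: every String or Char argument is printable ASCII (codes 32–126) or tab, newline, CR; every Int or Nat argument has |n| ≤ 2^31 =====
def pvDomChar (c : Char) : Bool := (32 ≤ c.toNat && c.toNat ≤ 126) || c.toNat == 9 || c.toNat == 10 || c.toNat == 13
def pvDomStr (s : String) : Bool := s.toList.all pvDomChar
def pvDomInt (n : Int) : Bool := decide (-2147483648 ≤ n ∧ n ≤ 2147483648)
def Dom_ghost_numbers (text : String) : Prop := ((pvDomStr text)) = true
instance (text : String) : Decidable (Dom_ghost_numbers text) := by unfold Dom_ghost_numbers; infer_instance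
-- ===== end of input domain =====

-- B replaces A's lookahead two-pointer scan by two run-length counter passes
-- (forward and backward) plus a pointwise translation (objective: alternative algorithm).

-- shared module-level constant _BOLD_DIGITS
def pvBoldDigits : PySem.Dict Char Char :=
  PySem.Dict.ofList [('0', '𝟎'), ('1', '𝟏'), ('2', '𝟐'), ('3', '𝟑'), ('4', '𝟒'),
                     ('5', '𝟓'), ('6', '𝟔'), ('7', '𝟕'), ('8', '𝟖'), ('9', '𝟗')]

-- ===== PORT A =====
-- A's outer while-loop: at a digit, the inner while advances j over the digit run
-- (ported as takeWhile), then i jumps to j (ported as drop).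
def pvLoopA : List Char → List (List Char)
  | [] => []
  | c :: rest =>
    if PySem.Chars.isdigit c then
      let run := rest.takeWhile PySem.Chars.isdigit
      let numStr := c :: run
      (if numStr.length ≥ 3 then
        numStr.map (fun d => pvBoldDigits.getD d d)
       else numStr) :: pvLoopA (rest.drop run.length)
    else [c] :: pvLoopA rest
  termination_by l => l.length
  decreasing_by
    · simpa using Nat.lt_succ_of_le (List.length_drop .. ▸ Nat.sub_le _ _)
    · simp

def ghost_numbers (text : String) : String :=
  String.mk (pvLoopA text.toList).flatten

-- ===== PORT B =====
-- one counter pass of Source B ('r = r + 1 if c.isdigit() else 0' appended per char)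
def pvScan (r : Nat) : List Char → List Nat
  | [] => []
  | c :: t =>
    let r' := if PySem.Chars.isdigit c then r + 1 else 0
    r' :: pvScan r' t

-- the final ''.join(... for c, f, b in zip(text, fwd, bwd))
def pvZipRender : List Char → List Nat → List Nat → List Char
  | c :: cs, f :: fs, b :: bs =>
    (if f + b ≥ 4 then pvBoldDigits.getD c c else c) :: pvZipRender cs fs bs
  | _, _, _ => []

def ghost_numbers_alt (text : String) : String :=
  let cs := text.toList
  let fwd := pvScan 0 cs
  let bwd := (pvScan 0 cs.reverse).reverse
  String.mk (pvZipRender cs fwd bwd)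

-- ===== PRECONDITION & SPEC =====
def Spec_ghost_numbers (text : String) (out : String) : Prop := out = ghost_numbers_alt text
instance (text : String) (out : String) : Decidable (Spec_ghost_numbers text out) := by unfold Spec_ghost_numbers; infer_instance

-- ===== CLAIM (what is proved, stated in full; the proofs are below) =====
def Claim_equal_ghost_numbers : Prop := ∀ (text : String), Dom_ghost_numbers text → Spec_ghost_numbers text (ghost_numbers text)

-- ===== LEMMAS AND PROOFS =====

-- left-recursive characterization of the reversed backward scan
def pvBwd : List Char → List Nat
  | [] => []
  | c :: t => (if PySem.Chars.isdigit c then (pvBwd t).headD 0 + 1 else 0) :: pvBwd t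

theorem pvLastD_cons (x : Nat) (L : List Nat) (r : Nat) :
    ((x :: L).getLast?.getD r) = L.getLast?.getD x := by
  induction L generalizing x r with
  | nil => rfl
  | cons a u ih => rw [ih a x, List.getLast?_cons_cons, ih a r]

theorem pvScan_append (r : Nat) (xs ys : List Char) :
    pvScan r (xs ++ ys) = pvScan r xs ++ pvScan ((pvScan r xs).getLast?.getD r) ys := by
  induction xs generalizing r with
  | nil => simp [pvScan]
  | cons c t ih =>
    simp only [List.cons_append, pvScan, ih]
    rw [pvLastD_cons]

theorem pvScan_rev (l : List Char) : (pvScan 0 l.reverse).reverse = pvBwd l := by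
  induction l with
  | nil => simp [pvScan, pvBwd]
  | cons c t ih =>
    rw [pvBwd, ← ih, List.reverse_cons, pvScan_append]
    have h1 : ∀ (L : List Nat), L.getLast?.getD 0 = L.reverse.head?.getD 0 := by
      intro L; induction L with
      | nil => rfl
      | cons a u ihL => cases u <;> simp_all
    simp [pvScan, h1 (pvScan 0 t.reverse)]

theorem pvScan_len (r : Nat) (l : List Char) : (pvScan r l).length = l.length := by
  induction l generalizing r with
  | nil => rfl
  | cons c t ih => simp [pvScan, ih]

theorem pvBwd_len (l : List Char) : (pvBwd l).length = l.length := by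
  induction l with
  | nil => rfl
  | cons c t ih => simp [pvBwd, ih]

-- ascending / descending counter segments inside an all-digit run
def pvAsc : Nat → Nat → List Nat
  | _, 0 => []
  | a, n + 1 => (a + 1) :: pvAsc (a + 1) n

def pvDesc : Nat → List Nat
  | 0 => []
  | n + 1 => (n + 1) :: pvDesc n

theorem pvAsc_len (a n : Nat) : (pvAsc a n).length = n := by
  induction n generalizing a with
  | zero => rfl
  | succ m ih => simp [pvAsc, ih]

theorem pvDesc_len (n : Nat) : (pvDesc n).length = n := by
  induction n with
  | zero => rfl
  | succ m ih => simp [pvDesc, ih]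

theorem pv_drop_takeWhile (p : Char → Bool) (l : List Char) :
    l.drop (l.takeWhile p).length = l.dropWhile p := by
  induction l with
  | nil => rfl
  | cons c t ih =>
    by_cases h : p c = true
    · simp [List.takeWhile_cons, List.dropWhile_cons, h, ih]
    · simp [List.takeWhile_cons, List.dropWhile_cons, h]

theorem pv_head_dropWhile (p : Char → Bool) (l : List Char) :
    ∀ c ∈ (l.dropWhile p).head?, p c = false := by
  induction l with
  | nil => simp
  | cons c t ih =>
    by_cases h : p c = true
    · simpa [List.dropWhile_cons, h] using ih
    · intro d hd
      rw [List.dropWhile_cons_of_neg (by simpa using h)] at hd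
      simp at hd
      subst hd
      simpa using h

theorem pvScan_start_irrel (a : Nat) (t : List Char)
    (ht : t = [] ∨ ∀ c ∈ t.head?, PySem.Chars.isdigit c = false) :
    pvScan a t = pvScan 0 t := by
  rcases ht with h | h
  · subst h; rfl
  · cases t with
    | nil => rfl
    | cons d u => simp [pvScan, h d (by simp)]

theorem pvScan_run (a : Nat) (s t : List Char) (hs : ∀ c ∈ s, PySem.Chars.isdigit c = true)
    (ht : t = [] ∨ ∀ c ∈ t.head?, PySem.Chars.isdigit c = false) :
    pvScan a (s ++ t) = pvAsc a s.length ++ pvScan 0 t := by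
  induction s generalizing a with
  | nil => simpa [pvAsc] using pvScan_start_irrel a t ht
  | cons c u ih =>
    have hc := hs c (by simp)
    simp [pvScan, hc, pvAsc, ih (a + 1) (fun d hd => hs d (List.mem_cons_of_mem _ hd))]

theorem pvBwd_run (s t : List Char) (hs : ∀ c ∈ s, PySem.Chars.isdigit c = true)
    (ht : t = [] ∨ ∀ c ∈ t.head?, PySem.Chars.isdigit c = false) :
    pvBwd (s ++ t) = pvDesc s.length ++ pvBwd t := by
  induction s with
  | nil => simp [pvDesc]
  | cons c u ih =>
    have hc := hs c (by simp)
    have ihu := ih (fun d hd => hs d (List.mem_cons_of_mem _ hd))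
    have hhead : (pvBwd (u ++ t)).headD 0 = u.length := by
      rw [ihu]
      cases u with
      | nil =>
        simp only [List.length_nil, pvDesc, List.nil_append]
        rcases ht with h | h
        · simp [h, pvBwd]
        · cases t with
          | nil => rfl
          | cons d v => simp [pvBwd, h d (by simp)]
      | cons d v => simp [pvDesc]
    rw [List.cons_append, pvBwd, hhead, ihu]
    simp [hc, pvDesc]

theorem pvZipRender_append (cs cs' : List Char) (fs fs' bs bs' : List Nat)
    (h1 : fs.length = cs.length) (h2 : bs.length = cs.length) :
    pvZipRender (cs ++ cs') (fs ++ fs') (bs ++ bs') =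
      pvZipRender cs fs bs ++ pvZipRender cs' fs' bs' := by
  induction cs generalizing fs bs with
  | nil => cases fs <;> cases bs <;> simp_all [pvZipRender]
  | cons c u ih =>
    cases fs with
    | nil => simp at h1
    | cons f fs =>
      cases bs with
      | nil => simp at h2
      | cons b bs => simp_all [pvZipRender]

theorem pvZipRender_seg (s : List Char) (a n : Nat) (hn : a + s.length = n) :
    pvZipRender s (pvAsc a s.length) (pvDesc s.length) =
      (if n ≥ 3 then s.map (fun d => pvBoldDigits.getD d d) else s) := by
  induction s generalizing a with
  | nil => cases hn; simp [pvAsc, pvDesc, pvZipRender]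
  | cons c u ih =>
    simp only [List.length_cons] at hn ⊢
    simp only [pvAsc, pvDesc, pvZipRender]
    rw [ih (a + 1) (by omega)]
    by_cases h : n ≥ 3
    · rw [if_pos (show 4 ≤ a + 1 + (u.length + 1) by omega), if_pos h, if_pos h]
      simp
    · rw [if_neg (show ¬ 4 ≤ a + 1 + (u.length + 1) by omega), if_neg h, if_neg h]

theorem pvMain (l : List Char) :
    (pvLoopA l).flatten = pvZipRender l (pvScan 0 l) (pvBwd l) := by
  induction hn : l.length using Nat.strong_induction_on generalizing l with
  | _ n ih =>
    match l with
    | [] => simp [pvLoopA, pvScan, pvBwd, pvZipRender]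
    | c :: rest =>
      rw [pvLoopA]
      by_cases h : PySem.Chars.isdigit c = true
      · -- digit run
        set tw := rest.takeWhile PySem.Chars.isdigit with htw
        have hdrop : rest.drop tw.length = rest.dropWhile PySem.Chars.isdigit := by
          rw [htw, pv_drop_takeWhile]
        have hsplit : c :: rest = (c :: tw) ++ rest.drop tw.length := by
          rw [hdrop, htw]; simp
        have hs : ∀ d ∈ (c :: tw), PySem.Chars.isdigit d = true := by
          intro d hd
          rcases List.mem_cons.1 hd with rfl | hd
          · exact h
          · exact List.mem_takeWhile_imp hd
        have ht : rest.drop tw.length = [] ∨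
            ∀ d ∈ (rest.drop tw.length).head?, PySem.Chars.isdigit d = false := by
          right; rw [hdrop]; exact pv_head_dropWhile _ rest
        have hflat : (pvLoopA (rest.drop tw.length)).flatten =
            pvZipRender (rest.drop tw.length) (pvScan 0 (rest.drop tw.length))
              (pvBwd (rest.drop tw.length)) := by
          have hlt : (rest.drop tw.length).length < n := by
            subst hn; simp only [List.length_drop, List.length_cons]; omega
          exact ih _ hlt _ rfl
        rw [if_pos h]
        conv_rhs => rw [hsplit]
        rw [pvScan_run 0 _ _ hs ht, pvBwd_run _ _ hs ht,
          pvZipRender_append _ _ _ _ _ _ (by simp [pvAsc_len, pvScan_len])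
            (by simp [pvDesc_len, pvBwd_len]),
          pvZipRender_seg _ 0 (c :: tw).length (by simp), ← hflat]
        simp
      · have hc : PySem.Chars.isdigit c = false := by simpa using h
        rw [if_neg h]
        have hzip : pvZipRender (c :: rest) (pvScan 0 (c :: rest)) (pvBwd (c :: rest)) =
            c :: pvZipRender rest (pvScan 0 rest) (pvBwd rest) := by
          simp [pvScan, pvBwd, hc, pvZipRender]
        rw [hzip]
        have hlt : rest.length < n := by subst hn; simp
        simp [ih _ hlt _ rfl]

theorem pv_alt_eq (l : List Char) :
    pvZipRender l (pvScan 0 l) ((pvScan 0 l.reverse).reverse) =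
      pvZipRender l (pvScan 0 l) (pvBwd l) := by
  rw [pvScan_rev]

-- ===== VERDICT (by name: the statement is the Claim_ definition above) =====
theorem ghost_numbers_spec : Claim_equal_ghost_numbers := by
  intro text _
  unfold Spec_ghost_numbers ghost_numbers ghost_numbers_alt
  show String.mk (pvLoopA text.toList).flatten =
    String.mk (pvZipRender text.toList (pvScan 0 text.toList)
      ((pvScan 0 text.toList.reverse).reverse))
  rw [pv_alt_eq, pvMain]
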